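-- pv_equiv track=rewrite | github.com/BrenanLester/Bible_App_Project | search.py | search_bible
-- ===== SOURCE A (Python) =====
-- def _compute_lps(pattern: str):
--     lps = [0] * len(pattern)
--     length = 0
--     i = 1
--     while i < len(pattern):
--         if pattern[i] == pattern[length]:
--             length += 1
--             lps[i] = length
--             i += 1
--         else:
--             if length != 0:
--                 length = lps[length - 1]
--             else:
--                 lps[i] = 0
--                 i += 1
--     return lps
--
-- def kmp_search(text: str, pattern: str) -> bool:
--     if not pattern:
--         return False
--     t = text.lower()
--     p = pattern.lower()
--     lps = _compute_lps(p)
--     i = j = 0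
--     while i < len(t):
--         if t[i] == p[j]:
--             i += 1
--             j += 1
--             if j == len(p):
--                 return True
--         else:
--             if j != 0:
--                 j = lps[j - 1]
--             else:
--                 i += 1
--     return False
--
-- def search_bible(bible, query):
--     """Search through nested bible dict {book: {chapter: {verse: text}}}.
--
--     Returns list of tuples (book, chapter:verse, text)
--     """
--     if not query:
--         return []
--     results = []
--     for book, chapters in bible.items():
--         for chapter, verses in chapters.items():
--             for verse_num, verse_text in verses.items():
--                 if kmp_search(verse_text, query):
--                     results.append((book, f"{chapter}:{verse_num}", verse_text))
--     return results
-- ===== SOURCE B (Python) =====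
-- def search_bible(bible, query):
--     """Search through nested bible dict {book: {chapter: {verse: text}}}.
--
--     Returns list of tuples (book, chapter:verse, text)
--     """
--     if not query:
--         return []
--     q = query.lower()
--     return [(book, f"{chapter}:{verse_num}", verse_text)
--             for book, chapters in bible.items()
--             for chapter, verses in chapters.items()
--             for verse_num, verse_text in verses.items()
--             if q in verse_text.lower()]
-- ===== Notes on version B (the rewrite author's own statement) =====
-- stated objective: idiomatic
-- what changed: Replaced the hand-written KMP matcher (_compute_lps + kmp_search) and the nested accumulator loops with Python's built-in substring test 'q in text.lower()' inside a single list comprehension, lowercasing the query once.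
import Mathlib
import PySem

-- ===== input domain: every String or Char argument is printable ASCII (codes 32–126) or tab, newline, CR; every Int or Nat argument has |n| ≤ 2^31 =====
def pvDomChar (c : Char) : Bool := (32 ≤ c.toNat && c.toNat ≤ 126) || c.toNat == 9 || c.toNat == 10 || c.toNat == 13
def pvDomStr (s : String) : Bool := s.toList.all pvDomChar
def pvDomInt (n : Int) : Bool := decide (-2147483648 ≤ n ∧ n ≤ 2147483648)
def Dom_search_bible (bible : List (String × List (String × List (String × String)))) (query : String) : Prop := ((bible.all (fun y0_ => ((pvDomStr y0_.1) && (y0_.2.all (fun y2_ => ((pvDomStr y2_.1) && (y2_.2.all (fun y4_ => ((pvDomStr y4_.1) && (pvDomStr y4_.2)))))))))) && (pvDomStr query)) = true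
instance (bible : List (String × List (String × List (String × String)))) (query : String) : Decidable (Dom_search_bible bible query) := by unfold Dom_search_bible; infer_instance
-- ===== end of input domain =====

-- B replaces A's hand-written KMP substring matcher and accumulator loops with the built-in
-- substring containment test inside one comprehension (objective: idiomatic); same return value on all inputs.

-- ===== PORT A =====
-- the `while i < len(pattern)` loop of _compute_lps; fuel 2*len(pattern)+1 always suffices
-- (each iteration strictly increases 2*i - length, which stays ≤ 2*len(pattern))
def lpsLoop (p : List Char) (fuel : Nat) (lps : List Nat) (len i : Nat) : List Nat :=
  match fuel with
  | 0 => lps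
  | fuel + 1 =>
    if i < p.length then
      if p.getD i ' ' = p.getD len ' ' then
        lpsLoop p fuel (lps.set i (len + 1)) (len + 1) (i + 1)
      else if len ≠ 0 then
        lpsLoop p fuel lps (lps.getD (len - 1) 0) i
      else
        lpsLoop p fuel (lps.set i 0) 0 (i + 1)
    else lps

-- _compute_lps
def computeLps (p : List Char) : List Nat :=
  lpsLoop p (2 * p.length + 1) (List.replicate p.length 0) 0 1

-- the `while i < len(t)` loop of kmp_search; fuel 2*len(t)+1 always suffices (same measure)
def kmpLoop (t p : List Char) (lps : List Nat) (fuel : Nat) (i j : Nat) : Bool :=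
  match fuel with
  | 0 => false
  | fuel + 1 =>
    if i < t.length then
      if t.getD i ' ' = p.getD j ' ' then
        if j + 1 = p.length then true
        else kmpLoop t p lps fuel (i + 1) (j + 1)
      else if j ≠ 0 then
        kmpLoop t p lps fuel i (lps.getD (j - 1) 0)
      else
        kmpLoop t p lps fuel (i + 1) 0
    else false

def kmp_search (text pattern : String) : Bool :=
  if pattern = "" then false
  else
    kmpLoop (PySem.Str.lower text).toList (PySem.Str.lower pattern).toList
      (computeLps (PySem.Str.lower pattern).toList)
      (2 * (PySem.Str.lower text).toList.length + 1) 0 0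

def search_bible (bible : List (String × List (String × List (String × String)))) (query : String) : List (String × String × String) :=
  if query = "" then []
  else
    bible.foldl (fun results bc =>
      bc.2.foldl (fun results cv =>
        cv.2.foldl (fun results vt =>
          if kmp_search vt.2 query then results ++ [(bc.1, cv.1 ++ ":" ++ vt.1, vt.2)]
          else results) results) results) []

-- ===== PORT B =====
def search_bible_alt (bible : List (String × List (String × List (String × String)))) (query : String) : List (String × String × String) :=
  if query = "" then []
  else
    bible.flatMap (fun bc =>
      bc.2.flatMap (fun cv =>
        (cv.2.filter (fun vt => PySem.Str.isIn (PySem.Str.lower query) (PySem.Str.lower vt.2))).map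
          (fun vt => (bc.1, cv.1 ++ ":" ++ vt.1, vt.2))))

-- ===== PRECONDITION & SPEC =====
def Spec_search_bible (bible : List (String × List (String × List (String × String)))) (query : String) (out : List (String × String × String)) : Prop := out = search_bible_alt bible query
instance (bible : List (String × List (String × List (String × String)))) (query : String) (out : List (String × String × String)) : Decidable (Spec_search_bible bible query out) := by unfold Spec_search_bible; infer_instance

-- ===== CLAIM (what is proved, stated in full; the proofs are below) =====
def Claim_equal_search_bible : Prop := ∀ (bible : List (String × List (String × List (String × String)))) (query : String), Dom_search_bible bible query → Spec_search_bible bible query (search_bible bible query)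

-- ===== LEMMAS AND PROOFS =====

lemma concat_suffix_concat (u v : List Char) (a b : Char) :
    u ++ [a] <:+ v ++ [b] ↔ u <:+ v ∧ a = b := by
  constructor
  · intro h
    rw [← List.reverse_prefix] at h
    simp only [List.reverse_append, List.reverse_cons, List.reverse_nil, List.nil_append,
      List.singleton_append, List.cons_prefix_cons, List.reverse_prefix] at h
    exact ⟨h.2, h.1⟩
  · rintro ⟨⟨w, rfl⟩, rfl⟩
    exact ⟨w, by simp⟩

-- one matching step: extending a partial match by one character
lemma take_succ_suffix (p t : List Char) (k i : Nat) (hk : k < p.length) (hi : i < t.length) :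
    p.take (k + 1) <:+ t.take (i + 1) ↔ (p.take k <:+ t.take i ∧ p.getD k ' ' = t.getD i ' ') := by
  rw [List.take_succ_eq_append_getElem hk, List.take_succ_eq_append_getElem hi,
    concat_suffix_concat]
  simp [List.getD_eq_getElem?_getD, hk, hi]

lemma infix_iff_suffix_take (u v : List Char) :
    u <:+: v ↔ ∃ n, n ≤ v.length ∧ u <:+ v.take n := by
  constructor
  · rintro ⟨s, t2, rfl⟩
    refine ⟨s.length + u.length, by simp, ?_⟩
    rw [List.take_left' (by simp)]
    exact List.suffix_append s u
  · rintro ⟨n, _, hs⟩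
    exact hs.isInfix.trans (List.take_prefix n v).isInfix

lemma take_suffix_take_of_le (p : List Char) {u : List Char} {k j : Nat} (hkj : k ≤ j)
    (h1 : p.take k <:+ u) (h2 : p.take j <:+ u) : p.take k <:+ p.take j :=
  List.suffix_of_suffix_length_le h1 h2 (by rw [List.length_take, List.length_take]; omega)

-- pb p j: length of the longest proper border of p.take j
def pb (p : List Char) (j : Nat) : Nat :=
  Nat.findGreatest (fun k => p.take k <:+ p.take j) (j - 1)

lemma pb_le (p : List Char) (j : Nat) : pb p j ≤ j - 1 := by
  unfold pb; exact Nat.findGreatest_le _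

lemma pb_suffix (p : List Char) (j : Nat) : p.take (pb p j) <:+ p.take j := by
  unfold pb
  exact Nat.findGreatest_spec (P := fun k => p.take k <:+ p.take j) (Nat.zero_le _)
    (show p.take 0 <:+ p.take j by rw [List.take_zero]; exact List.nil_suffix)

lemma pb_not_suffix (p : List Char) (j k : Nat) (h1 : pb p j < k) (h2 : k ≤ j - 1) :
    ¬ p.take k <:+ p.take j := by
  unfold pb at h1
  exact Nat.findGreatest_is_greatest h1 h2

lemma pb_eq_of (p : List Char) (j m : Nat) (hm : m ≤ j - 1) (hP : p.take m <:+ p.take j)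
    (hmax : ∀ k, m < k → k ≤ j - 1 → ¬ p.take k <:+ p.take j) : pb p j = m := by
  have h1 : m ≤ pb p j := by unfold pb; exact Nat.le_findGreatest (P := fun k => p.take k <:+ p.take j) hm hP
  rcases Nat.lt_or_ge m (pb p j) with h | h
  · exact absurd (pb_suffix p j) (hmax _ h (pb_le p j))
  · omega

lemma getD_set_self' (l : List Nat) (i v : Nat) (h : i < l.length) :
    (l.set i v).getD i 0 = v := by
  simp [List.getD_eq_getElem?_getD, h]

lemma getD_set_ne' (l : List Nat) (i j v : Nat) (h : i ≠ j) :
    (l.set i v).getD j 0 = l.getD j 0 := by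
  simp [List.getD_eq_getElem?_getD, h]

-- invariant proof for the _compute_lps loop: on exit every entry m holds pb p (m+1)
theorem lpsLoop_spec (p : List Char) : ∀ (fuel : Nat) (lps : List Nat) (len i : Nat),
    lps.length = p.length →
    (∀ m, m < i → m < p.length → lps.getD m 0 = pb p (m + 1)) →
    len < i →
    p.take len <:+ p.take i →
    (∀ k, len < k → k < i → p.take k <:+ p.take i → p.getD k ' ' ≠ p.getD i ' ') →
    2 * (p.length - i) + len + 1 ≤ fuel →
    ∀ m, m < p.length → (lpsLoop p fuel lps len i).getD m 0 = pb p (m + 1) := by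
  intro fuel
  induction fuel with
  | zero => intro lps len i _ _ _ _ _ hf; omega
  | succ fuel ih =>
    intro lps len i hlen hent hli hb hfail hf m hm
    rw [lpsLoop]
    by_cases hi : i < p.length
    · rw [if_pos hi]
      by_cases hc : p.getD i ' ' = p.getD len ' '
      · rw [if_pos hc]
        have hlenp : len < p.length := lt_trans hli hi
        have hnew : p.take (len + 1) <:+ p.take (i + 1) :=
          (take_succ_suffix p p len i hlenp hi).mpr ⟨hb, hc.symm⟩
        have hub : ∀ k, len + 1 < k → k ≤ i → ¬ p.take k <:+ p.take (i + 1) := by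
          intro k h1 h2 hk
          have hk1 : k - 1 < p.length := by omega
          have h3 := (take_succ_suffix p p (k - 1) i hk1 hi).mp
            (by rw [show k - 1 + 1 = k by omega]; exact hk)
          exact hfail (k - 1) (by omega) (by omega) h3.1 h3.2
        have key1 : pb p (i + 1) = len + 1 :=
          pb_eq_of p (i + 1) (len + 1) (by omega) hnew (fun k h1 h2 => hub k h1 (by omega))
        apply ih
        · simp [hlen]
        · intro m' hm1 hm2
          by_cases hmi : m' = i
          · rw [hmi, getD_set_self' lps i (len + 1) (by omega), key1]
          · rw [getD_set_ne' lps i m' (len + 1) (fun h => hmi h.symm)]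
            exact hent m' (by omega) hm2
        · omega
        · exact hnew
        · intro k h1 h2 h3
          exact absurd h3 (hub k h1 (by omega))
        · omega
        · exact hm
      · rw [if_neg hc]
        by_cases hl0 : len ≠ 0
        · rw [if_pos hl0]
          have hl1 : len - 1 < p.length := by omega
          have hentry : lps.getD (len - 1) 0 = pb p len := by
            have h4 := hent (len - 1) (by omega) hl1
            rwa [show len - 1 + 1 = len by omega] at h4
          rw [hentry]
          have hple := pb_le p len
          apply ih
          · exact hlen
          · exact hent
          · omega
          · exact (pb_suffix p len).trans hb
          · intro k h1 h2 h3
            rcases lt_trichotomy k len with h | h | h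
            · exact absurd (take_suffix_take_of_le p (le_of_lt h) h3 hb)
                (pb_not_suffix p len k h1 (by omega))
            · subst h
              exact fun he => hc he.symm
            · exact hfail k h h2 h3
          · omega
          · exact hm
        · rw [if_neg hl0]
          have hl0' : len = 0 := by omega
          subst hl0'
          have hub0 : ∀ k, 0 < k → k ≤ i → ¬ p.take k <:+ p.take (i + 1) := by
            intro k h1 h2 hk
            have hk1 : k - 1 < p.length := by omega
            have h3 := (take_succ_suffix p p (k - 1) i hk1 hi).mp
              (by rw [show k - 1 + 1 = k by omega]; exact hk)
            by_cases h5 : k - 1 = 0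
            · rw [h5] at h3
              exact hc h3.2.symm
            · exact hfail (k - 1) (by omega) (by omega) h3.1 h3.2
          have key0 : pb p (i + 1) = 0 :=
            pb_eq_of p (i + 1) 0 (Nat.zero_le _) (by simp)
              (fun k h1 h2 => hub0 k h1 (by omega))
          apply ih
          · simp [hlen]
          · intro m' hm1 hm2
            by_cases hmi : m' = i
            · rw [hmi, getD_set_self' lps i 0 (by omega), key0]
            · rw [getD_set_ne' lps i m' 0 (fun h => hmi h.symm)]
              exact hent m' (by omega) hm2
          · omega
          · simp
          · intro k h1 h2 h3
            exact absurd h3 (hub0 k h1 (by omega))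
          · omega
          · exact hm
    · rw [if_neg hi]
      exact hent m (by omega) hm

-- invariant proof for the kmp_search loop: it returns exactly "p occurs in t"
theorem kmpLoop_spec (t p : List Char) (lps : List Nat) (hp : p ≠ [])
    (hlps : ∀ m, m < p.length → lps.getD m 0 = pb p (m + 1)) :
    ∀ (fuel i j : Nat), i ≤ t.length → j < p.length →
    p.take j <:+ t.take i →
    (∀ k, j < k → k < p.length → p.take k <:+ t.take i → p.getD k ' ' ≠ t.getD i ' ') →
    (∀ i', i' ≤ i → ¬ p <:+ t.take i') →
    2 * (t.length - i) + j + 1 ≤ fuel →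
    kmpLoop t p lps fuel i j = PySem.Chars.isIn p t := by
  have hn : 0 < p.length := by
    cases p with
    | nil => exact absurd rfl hp
    | cons a l => simp
  intro fuel
  induction fuel with
  | zero => intro i j _ _ _ _ _ hf; omega
  | succ fuel ih =>
    intro i j hit hjp hb hfail hocc hf
    rw [kmpLoop]
    by_cases hi : i < t.length
    · rw [if_pos hi]
      by_cases hc : t.getD i ' ' = p.getD j ' '
      · rw [if_pos hc]
        have hext : p.take (j + 1) <:+ t.take (i + 1) :=
          (take_succ_suffix p t j i hjp hi).mpr ⟨hb, hc.symm⟩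
        by_cases hj1 : j + 1 = p.length
        · rw [if_pos hj1]
          rw [hj1, List.take_length] at hext
          exact ((PySem.Chars.isIn_iff_infix p t).mpr
            (hext.isInfix.trans (List.take_prefix _ _).isInfix)).symm
        · rw [if_neg hj1]
          apply ih
          · omega
          · omega
          · exact hext
          · intro k h1 h2 h3
            have hk1 : k - 1 < p.length := by omega
            have h4 := (take_succ_suffix p t (k - 1) i hk1 hi).mp
              (by rw [show k - 1 + 1 = k by omega]; exact h3)
            exact absurd h4.2 (hfail (k - 1) (by omega) (by omega) h4.1)
          · intro i' hi'
            by_cases hi2 : i' ≤ i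
            · exact hocc i' hi2
            · have h5 : i' = i + 1 := by omega
              subst h5
              intro hocc'
              have hn1 : p.length - 1 < p.length := by omega
              have h4 := (take_succ_suffix p t (p.length - 1) i hn1 hi).mp
                (by rw [show p.length - 1 + 1 = p.length by omega, List.take_length]; exact hocc')
              exact hfail (p.length - 1) (by omega) (by omega) h4.1 h4.2
          · omega
      · rw [if_neg hc]
        by_cases hj0 : j ≠ 0
        · rw [if_pos hj0]
          have hj1 : j - 1 < p.length := by omega
          have hentry : lps.getD (j - 1) 0 = pb p j := by
            have h4 := hlps (j - 1) hj1
            rwa [show j - 1 + 1 = j by omega] at h4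
          rw [hentry]
          have hple := pb_le p j
          apply ih
          · exact hit
          · omega
          · exact (pb_suffix p j).trans hb
          · intro k h1 h2 h3
            rcases lt_trichotomy k j with h | h | h
            · exact absurd (take_suffix_take_of_le p (le_of_lt h) h3 hb)
                (pb_not_suffix p j k h1 (by omega))
            · subst h
              exact fun he => hc he.symm
            · exact hfail k h h2 h3
          · exact hocc
          · omega
        · rw [if_neg hj0]
          have hj0' : j = 0 := by omega
          subst hj0'
          apply ih
          · omega
          · exact hn
          · simp
          · intro k h1 h2 h3
            have hk1 : k - 1 < p.length := by omega
            have h4 := (take_succ_suffix p t (k - 1) i hk1 hi).mp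
              (by rw [show k - 1 + 1 = k by omega]; exact h3)
            by_cases h5 : k - 1 = 0
            · rw [h5] at h4
              exact absurd h4.2.symm hc
            · exact absurd h4.2 (hfail (k - 1) (by omega) (by omega) h4.1)
          · intro i' hi'
            by_cases hi2 : i' ≤ i
            · exact hocc i' hi2
            · have h5 : i' = i + 1 := by omega
              subst h5
              intro hocc'
              have hn1 : p.length - 1 < p.length := by omega
              have h4 := (take_succ_suffix p t (p.length - 1) i hn1 hi).mp
                (by rw [show p.length - 1 + 1 = p.length by omega, List.take_length]; exact hocc')
              by_cases h5 : p.length - 1 = 0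
              · rw [h5] at h4
                exact hc h4.2.symm
              · exact hfail (p.length - 1) (by omega) (by omega) h4.1 h4.2
          · omega
    · rw [if_neg hi]
      symm
      rw [PySem.Chars.isIn_eq_false_iff]
      intro hinf
      rcases (infix_iff_suffix_take p t).mp hinf with ⟨n, hnle, hsuf⟩
      exact hocc n (by omega) hsuf

theorem computeLps_spec (p : List Char) (hp : p ≠ []) :
    ∀ m, m < p.length → (computeLps p).getD m 0 = pb p (m + 1) := by
  have hn : 0 < p.length := by
    cases p with
    | nil => exact absurd rfl hp
    | cons a l => simp
  apply lpsLoop_spec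
  · simp
  · intro m hm1 hm2
    have hm0 : m = 0 := by omega
    subst hm0
    simp [List.getD_eq_getElem?_getD, hn, pb]
  · omega
  · simp
  · intro k h1 h2
    exact absurd h2 (by omega)
  · omega

theorem kmp_search_eq (text pattern : String) (h : pattern ≠ "") :
    kmp_search text pattern = PySem.Str.isIn (PySem.Str.lower pattern) (PySem.Str.lower text) := by
  have hp : (PySem.Str.lower pattern).toList ≠ [] := by
    rw [PySem.Str.toList_lower]
    simp only [PySem.Chars.lower, ne_eq, List.map_eq_nil_iff, String.toList_eq_nil_iff]
    exact h
  have hn : 0 < (PySem.Str.lower pattern).toList.length := by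
    cases hx : (PySem.Str.lower pattern).toList with
    | nil => exact absurd hx hp
    | cons a l => simp
  rw [kmp_search, if_neg h, PySem.Str.isIn_eq]
  apply kmpLoop_spec _ _ _ hp (computeLps_spec _ hp)
  · exact Nat.zero_le _
  · exact hn
  · simp
  · intro k h1 h2 h3
    rw [List.take_zero, List.suffix_nil, List.take_eq_nil_iff] at h3
    rcases h3 with h3 | h3
    · omega
    · exact absurd h3 hp
  · intro i' hi'
    have h5 : i' = 0 := by omega
    subst h5
    simpa using hp
  · omega

-- ===== VERDICT (by name: the statement is the Claim_ definition above) =====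
theorem search_bible_spec : Claim_equal_search_bible := by
  intro bible query _
  unfold Spec_search_bible
  by_cases hq : query = ""
  · simp [search_bible, search_bible_alt, hq]
  · have hk : ∀ s : String, kmp_search s query
        = PySem.Str.isIn (PySem.Str.lower query) (PySem.Str.lower s) :=
      fun s => kmp_search_eq s query hq
    simp only [search_bible, search_bible_alt, if_neg hq, hk,
      PySem.List.foldl_append_if, PySem.List.foldl_append_eq_flatMap, List.nil_append]
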